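-- pv_equiv track=rewrite | github.com/soniakhilesh/divorceanalytics | decision_tree_functions.py | define_branch_ancestors
-- ===== SOURCE A (Python) =====
-- def define_branch_ancestors(leaf_nodes):
--     """ Define the left/right-branch ancestors of leaf nodes.
--
--     Returns
--     -------
--     left_branch_ancestors : dict mapping leaf nodes to left-branch ancestors
--     right_branch_ancestors : dict mapping leaf nodes to right-branch ancestors
--     """
--     left_branch_ancestors = {}
--     right_branch_ancestors = {}
--     for n in leaf_nodes:
--         lba = set()
--         rba = set()
--         curr_node = n
--         while curr_node > 1:
--             parent = int(curr_node/2)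
--             if curr_node == 2*parent:
--                 lba.add(parent)
--             else:
--                 rba.add(parent)
--             curr_node = parent
--         left_branch_ancestors[n] = lba
--         right_branch_ancestors[n] = rba
--     return left_branch_ancestors, right_branch_ancestors
-- ===== SOURCE B (Python) =====
-- def define_branch_ancestors(leaf_nodes):
--     """ Define the left/right-branch ancestors of leaf nodes.
--
--     Memoized top-down recursion: the ancestor sets of a node extend those of
--     its parent by one element, so compute them once per node and share the
--     work across leaves via a cache (dynamic programming on the parent chain).
--     """
--     cache = {}
--
--     def anc(n):
--         if n <= 1:
--             return set(), set()
--         if n in cache: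
--             return cache[n]
--         parent = n >> 1
--         l, r = anc(parent)
--         res = ({parent} | l, r) if n == 2 * parent else (l, {parent} | r)
--         cache[n] = res
--         return res
--
--     left_branch_ancestors = {}
--     right_branch_ancestors = {}
--     for n in leaf_nodes:
--         l, r = anc(n)
--         left_branch_ancestors[n] = l
--         right_branch_ancestors[n] = r
--     return left_branch_ancestors, right_branch_ancestors
-- ===== Notes on version B (the rewrite author's own statement) =====
-- stated objective: alternative
-- what changed: Replaces A's independent per-leaf while-loop (halving curr_node and mutating two fresh sets) with a memoized recursion anc(n) that extends the parent's ancestor-set pair by one set union and caches it, sharing the parent-chain computation across leaves (dynamic programming on the ancestor chain).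
import Mathlib
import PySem

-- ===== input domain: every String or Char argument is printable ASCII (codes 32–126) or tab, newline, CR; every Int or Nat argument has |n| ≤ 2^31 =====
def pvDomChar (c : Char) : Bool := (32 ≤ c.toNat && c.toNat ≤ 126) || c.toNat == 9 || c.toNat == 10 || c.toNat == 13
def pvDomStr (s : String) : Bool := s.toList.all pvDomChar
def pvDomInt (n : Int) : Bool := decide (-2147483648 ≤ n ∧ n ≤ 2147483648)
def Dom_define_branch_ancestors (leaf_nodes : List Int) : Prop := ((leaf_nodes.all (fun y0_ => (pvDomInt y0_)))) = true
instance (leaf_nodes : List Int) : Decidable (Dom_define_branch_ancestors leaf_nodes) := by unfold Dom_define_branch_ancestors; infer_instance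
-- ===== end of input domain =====

-- B replaces A's per-leaf halving loop with a memoized recursion on the parent chain,
-- sharing ancestor sets across leaves via a cache (objective: alternative; same cost class).

-- ===== PORT A =====
-- A's inner while-loop: climb from n towards the root, classifying each parent.
-- int(curr_node/2) is truncating division, exact for |curr_node| < 2^53 (PySem.Int.truncdiv).
def pvALoop (curr : Int) (lba rba : PySem.Set Int) : PySem.Set Int × PySem.Set Int :=
  if _h : 1 < curr then
    let parent := PySem.Int.truncdiv curr 2
    if curr = 2 * parent then
      pvALoop parent (PySem.Set.add lba parent) rba
    else
      pvALoop parent lba (PySem.Set.add rba parent)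
  else (lba, rba)
termination_by curr.toNat
decreasing_by
  all_goals simp only [PySem.Int.truncdiv]
  all_goals rw [Int.tdiv_eq_ediv_of_nonneg (by omega)]
  all_goals omega

def pvAStep (st : PySem.Dict Int (List Int) × PySem.Dict Int (List Int)) (n : Int) :
    PySem.Dict Int (List Int) × PySem.Dict Int (List Int) :=
  let p := pvALoop n PySem.Set.empty PySem.Set.empty
  (st.1.insert n p.1, st.2.insert n p.2)

def define_branch_ancestors (leaf_nodes : List Int) : (List (Int × List Int)) × (List (Int × List Int)) :=
  let st := leaf_nodes.foldl pvAStep (PySem.Dict.empty, PySem.Dict.empty)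
  (st.1.items, st.2.items)

-- ===== PORT B =====
-- B's memoized helper anc(n): returns the pair of ancestor sets and threads the cache.
def pvBAnc (n : Int) (cache : PySem.Dict Int (List Int × List Int)) :
    (List Int × List Int) × PySem.Dict Int (List Int × List Int) :=
  if _h : n ≤ 1 then (([], []), cache)        -- if n <= 1: return set(), set()
  else
    match cache.get? n with                   -- if n in cache: return cache[n]
    | some v => (v, cache)
    | none =>
      let parent := n >>> (1 : Nat)           -- parent = n >> 1
      let lr := pvBAnc parent cache           -- l, r = anc(parent)
      let res :=                              -- res = ({parent} | l, r) if n == 2*parent else (l, {parent} | r)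
        if n = 2 * parent then
          (PySem.Set.union (PySem.Set.ofList [parent]) lr.1.1, lr.1.2)
        else
          (lr.1.1, PySem.Set.union (PySem.Set.ofList [parent]) lr.1.2)
      (res, lr.2.insert n res)                -- cache[n] = res; return res
termination_by n.toNat
decreasing_by
  rw [Int.shiftRight_eq_div_pow]
  norm_num
  omega

def pvBStep
    (st : (PySem.Dict Int (List Int) × PySem.Dict Int (List Int)) × PySem.Dict Int (List Int × List Int))
    (n : Int) :
    (PySem.Dict Int (List Int) × PySem.Dict Int (List Int)) × PySem.Dict Int (List Int × List Int) :=
  let r := pvBAnc n st.2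
  ((st.1.1.insert n r.1.1, st.1.2.insert n r.1.2), r.2)

def define_branch_ancestors_alt (leaf_nodes : List Int) : (List (Int × List Int)) × (List (Int × List Int)) :=
  let st := leaf_nodes.foldl pvBStep ((PySem.Dict.empty, PySem.Dict.empty), PySem.Dict.empty)
  (st.1.1.items, st.1.2.items)

-- ===== PRECONDITION & SPEC =====
def Spec_define_branch_ancestors (leaf_nodes : List Int) (out : (List (Int × List Int)) × (List (Int × List Int))) : Prop := out = define_branch_ancestors_alt leaf_nodes
instance (leaf_nodes : List Int) (out : (List (Int × List Int)) × (List (Int × List Int))) : Decidable (Spec_define_branch_ancestors leaf_nodes out) := by unfold Spec_define_branch_ancestors; infer_instance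

-- ===== CLAIM (what is proved, stated in full; the proofs are below) =====
def Claim_equal_define_branch_ancestors : Prop := ∀ (leaf_nodes : List Int), Dom_define_branch_ancestors leaf_nodes → Spec_define_branch_ancestors leaf_nodes (define_branch_ancestors leaf_nodes)

-- ===== LEMMAS AND PROOFS =====

-- The parent chain of a node, closest parent first, split by branch side.
def pvChains (curr : Int) : List Int × List Int :=
  if h : 1 < curr then
    (if curr % 2 = 0 then curr / 2 :: (pvChains (curr / 2)).1 else (pvChains (curr / 2)).1,
     if curr % 2 = 0 then (pvChains (curr / 2)).2 else curr / 2 :: (pvChains (curr / 2)).2)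
  else ([], [])
termination_by curr.toNat
decreasing_by all_goals omega

lemma pvChains_bound (K : Nat) : ∀ c : Int, c.toNat ≤ K → ∀ x : Int,
    (x ∈ (pvChains c).1 ∨ x ∈ (pvChains c).2) → 1 ≤ x ∧ x ≤ c / 2 := by
  induction K with
  | zero =>
    intro c hc x hx
    rw [pvChains, dif_neg (by omega : ¬ 1 < c)] at hx
    simp at hx
  | succ K ih =>
    intro c hc x hx
    by_cases h : 1 < c
    · rw [pvChains, dif_pos h] at hx
      have hrec : (x ∈ (pvChains (c / 2)).1 ∨ x ∈ (pvChains (c / 2)).2) → 1 ≤ x ∧ x ≤ c / 2 := by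
        intro hm
        have := ih (c / 2) (by omega) x hm
        omega
      by_cases hp : c % 2 = 0
      · simp only [if_pos hp] at hx
        rcases hx with hx | hx
        · rcases List.mem_cons.mp hx with rfl | hx
          · constructor <;> omega
          · exact hrec (Or.inl hx)
        · exact hrec (Or.inr hx)
      · simp only [if_neg hp] at hx
        rcases hx with hx | hx
        · exact hrec (Or.inl hx)
        · rcases List.mem_cons.mp hx with rfl | hx
          · constructor <;> omega
          · exact hrec (Or.inr hx)
    · rw [pvChains, dif_neg h] at hx
      simp at hx

lemma pvChains_nodup (K : Nat) : ∀ c : Int, c.toNat ≤ K →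
    (pvChains c).1.Nodup ∧ (pvChains c).2.Nodup := by
  induction K with
  | zero =>
    intro c hc
    rw [pvChains, dif_neg (by omega : ¬ 1 < c)]
    simp
  | succ K ih =>
    intro c hc
    by_cases h : 1 < c
    · rw [pvChains, dif_pos h]
      obtain ⟨h1, h2⟩ := ih (c / 2) (by omega)
      have hnm1 : c / 2 ∉ (pvChains (c / 2)).1 := fun hx => by
        have := pvChains_bound K (c / 2) (by omega) (c / 2) (Or.inl hx); omega
      have hnm2 : c / 2 ∉ (pvChains (c / 2)).2 := fun hx => by
        have := pvChains_bound K (c / 2) (by omega) (c / 2) (Or.inr hx); omega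
      by_cases hp : c % 2 = 0 <;> simp [hp, h1, h2, hnm1, hnm2]
    · rw [pvChains, dif_neg h]
      simp

-- A's loop appends the chain of curr to the accumulators (which only hold larger nodes).
lemma pvALoop_eq (K : Nat) : ∀ curr : Int, curr.toNat ≤ K → ∀ lba rba : List Int,
    (∀ x ∈ lba, curr ≤ x) → (∀ x ∈ rba, curr ≤ x) →
    pvALoop curr lba rba = (lba ++ (pvChains curr).1, rba ++ (pvChains curr).2) := by
  induction K with
  | zero =>
    intro curr hc lba rba _ _
    rw [pvALoop, dif_neg (by omega : ¬ 1 < curr), pvChains, dif_neg (by omega : ¬ 1 < curr)]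
    simp
  | succ K ih =>
    intro curr hc lba rba hl hr
    by_cases h : 1 < curr
    · rw [pvALoop, dif_pos h, pvChains, dif_pos h]
      have htd : PySem.Int.truncdiv curr 2 = curr / 2 := by
        simp [PySem.Int.truncdiv, Int.tdiv_eq_ediv_of_nonneg (by omega : (0:Int) ≤ curr)]
      simp only [htd]
      have hcond : (curr = 2 * (curr / 2)) ↔ curr % 2 = 0 := by omega
      have haddl : PySem.Set.add lba (curr / 2) = lba ++ [curr / 2] := by
        have hnot : (curr / 2) ∉ lba := fun hx => by have := hl _ hx; omega
        simp [PySem.Set.add, PySem.Set.contains, hnot]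
      have haddr : PySem.Set.add rba (curr / 2) = rba ++ [curr / 2] := by
        have hnot : (curr / 2) ∉ rba := fun hx => by have := hr _ hx; omega
        simp [PySem.Set.add, PySem.Set.contains, hnot]
      by_cases hp : curr % 2 = 0
      · rw [if_pos (hcond.mpr hp), if_pos hp, if_pos hp, haddl]
        rw [ih (curr / 2) (by omega) _ _
          (by intro x hx; rcases List.mem_append.mp hx with hx | hx
              · have := hl _ hx; omega
              · simp at hx; omega)
          (by intro x hx; have := hr _ hx; omega)]
        simp
      · rw [if_neg (fun hc2 => hp (hcond.mp hc2)), if_neg hp, if_neg hp, haddr]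
        rw [ih (curr / 2) (by omega) _ _
          (by intro x hx; have := hl _ hx; omega)
          (by intro x hx; rcases List.mem_append.mp hx with hx | hx
              · have := hr _ hx; omega
              · simp at hx; omega)]
        simp
    · rw [pvALoop, dif_neg h, pvChains, dif_neg h]
      simp

lemma pvALoop_chains (n : Int) :
    pvALoop n PySem.Set.empty PySem.Set.empty = pvChains n := by
  rw [pvALoop_eq n.toNat n le_rfl PySem.Set.empty PySem.Set.empty
      (by intro x hx; simp [PySem.Set.empty] at hx)
      (by intro x hx; simp [PySem.Set.empty] at hx)]
  simp [PySem.Set.empty]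

-- {parent} | t is parent :: t when parent is not in the (duplicate-free) list t.
lemma pvUnion_cons (x : Int) (t : List Int) (h : x ∉ t) (hn : t.Nodup) :
    PySem.Set.union (PySem.Set.ofList [x]) t = x :: t := by
  rw [show PySem.Set.union (PySem.Set.ofList [x]) t = PySem.Set.update [x] t from rfl]
  rw [PySem.Set.update_eq_append_filter, PySem.Set.ofList_eq_self_of_nodup _ hn]
  have hfil : t.filter (fun y => !(PySem.Set.contains [x] y)) = t := by
    apply List.filter_eq_self.mpr
    intro y hy
    simp [PySem.Set.contains]
    rintro rfl; exact h hy
  rw [hfil]; rfl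

-- Cache correctness invariant: every cached entry is the true chain pair.
def pvGood (cache : PySem.Dict Int (List Int × List Int)) : Prop :=
  ∀ k v, cache.get? k = some v → v = pvChains k

lemma pvBAnc_eq (K : Nat) : ∀ n : Int, n.toNat ≤ K →
    ∀ cache : PySem.Dict Int (List Int × List Int), pvGood cache →
    (pvBAnc n cache).1 = pvChains n ∧ pvGood (pvBAnc n cache).2 := by
  induction K with
  | zero =>
    intro n hn cache hg
    rw [pvBAnc, dif_pos (by omega : n ≤ 1), pvChains, dif_neg (by omega : ¬ 1 < n)]
    exact ⟨rfl, hg⟩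
  | succ K ih =>
    intro n hn cache hg
    by_cases h1 : n ≤ 1
    · rw [pvBAnc, dif_pos h1, pvChains, dif_neg (by omega : ¬ 1 < n)]
      exact ⟨rfl, hg⟩
    · rw [pvBAnc, dif_neg h1]
      cases hc : cache.get? n with
      | some v =>
        simp only
        rw [hg n v hc]
        exact ⟨rfl, hg⟩
      | none =>
        simp only
        have hsh : n >>> (1 : Nat) = n / 2 := by
          rw [Int.shiftRight_eq_div_pow]; norm_num
        have hrec := ih (n / 2) (by omega) cache hg
        have hcond : (n = 2 * (n / 2)) ↔ n % 2 = 0 := by omega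
        have hnodup := pvChains_nodup (n / 2).toNat (n / 2) le_rfl
        have hnm1 : n / 2 ∉ (pvChains (n / 2)).1 := fun hx => by
          have := pvChains_bound (n / 2).toNat (n / 2) le_rfl (n / 2) (Or.inl hx); omega
        have hnm2 : n / 2 ∉ (pvChains (n / 2)).2 := fun hx => by
          have := pvChains_bound (n / 2).toNat (n / 2) le_rfl (n / 2) (Or.inr hx); omega
        have hchain : pvChains n =
            (if n % 2 = 0 then n / 2 :: (pvChains (n / 2)).1 else (pvChains (n / 2)).1,
             if n % 2 = 0 then (pvChains (n / 2)).2 else n / 2 :: (pvChains (n / 2)).2) := by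
          rw [pvChains, dif_pos (by omega : 1 < n)]
        have hres :
            (if n = 2 * (n >>> (1:Nat)) then
              (PySem.Set.union (PySem.Set.ofList [n >>> (1:Nat)]) (pvBAnc (n >>> (1:Nat)) cache).1.1,
               (pvBAnc (n >>> (1:Nat)) cache).1.2)
            else
              ((pvBAnc (n >>> (1:Nat)) cache).1.1,
               PySem.Set.union (PySem.Set.ofList [n >>> (1:Nat)]) (pvBAnc (n >>> (1:Nat)) cache).1.2))
            = pvChains n := by
          rw [hsh, hrec.1, hchain]
          by_cases hp : n % 2 = 0
          · rw [if_pos (hcond.mpr hp), if_pos hp, if_pos hp,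
                pvUnion_cons _ _ hnm1 hnodup.1]
          · rw [if_neg (fun hc2 => hp (hcond.mp hc2)), if_neg hp, if_neg hp,
                pvUnion_cons _ _ hnm2 hnodup.2]
        refine ⟨hres, ?_⟩
        intro k v hk
        by_cases hkn : k = n
        · subst hkn
          rw [PySem.Dict.get?_insert_self] at hk
          rw [← hres]
          exact (Option.some_injective _ hk).symm
        · rw [PySem.Dict.get?_insert_of_ne _ _ (fun he => hkn he)] at hk
          have hg2 := (ih (n / 2) (by omega) cache hg).2
          rw [hsh] at hk
          exact hg2 k v hk

-- The two folds keep the same pair of output dictionaries.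
lemma pvFold_eq : ∀ (l : List Int)
    (dA : PySem.Dict Int (List Int) × PySem.Dict Int (List Int))
    (cache : PySem.Dict Int (List Int × List Int)), pvGood cache →
    l.foldl pvAStep dA = (l.foldl pvBStep (dA, cache)).1 := by
  intro l
  induction l with
  | nil => intro dA cache _; rfl
  | cons n t ih =>
    intro dA cache hg
    have hb := pvBAnc_eq n.toNat n le_rfl cache hg
    simp only [List.foldl_cons]
    have hstep : pvBStep (dA, cache) n =
        ((dA.1.insert n (pvChains n).1, dA.2.insert n (pvChains n).2), (pvBAnc n cache).2) := by
      simp only [pvBStep, hb.1]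
    rw [hstep, ← ih _ _ hb.2]
    simp only [pvAStep, pvALoop_chains]

-- ===== VERDICT (by name: the statement is the Claim_ definition above) =====
theorem define_branch_ancestors_spec : Claim_equal_define_branch_ancestors := by
  intro leaf_nodes _
  unfold Spec_define_branch_ancestors define_branch_ancestors define_branch_ancestors_alt
  rw [pvFold_eq leaf_nodes (PySem.Dict.empty, PySem.Dict.empty) PySem.Dict.empty
      (by intro k v hk; simp [PySem.Dict.empty, PySem.Dict.get?] at hk)]
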